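-- pv_equiv track=rewrite | github.com/BartvonMeijenfeldt/advent_of_code_2023 | 15/part2.py | get_box_nr_operation_and_focal_length
-- ===== SOURCE A (Python) =====
-- from typing import Optional
--
-- STOPPING_OPERATIONS = {"=", "-"}
--
-- def get_box_nr_operation_and_focal_length(
--     command: str,
-- ) -> tuple[int, Optional[str], Optional[int]]:
--     box_nr = 0
--
--     for i, c in enumerate(command):
--         if c in STOPPING_OPERATIONS:
--             label = command[:i]
--
--             if c == "=":
--                 focal_length = int(command[i + 1 :])
--             else:
--                 focal_length = None
--
--             return box_nr, label, focal_length
--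
--         box_nr += ord(c)
--         box_nr *= 17
--         box_nr %= 256
--
--     raise ValueError
-- ===== SOURCE B (Python) =====
-- def get_box_nr_operation_and_focal_length(command):
--     # Locate the first operation character, then hash the label in a separate pass.
--     n = len(command)
--     i = 0
--     while i < n and command[i] not in "=-":
--         i += 1
--     if i == n:
--         raise ValueError
--     label = command[:i]
--     box_nr = 0
--     for ch in label:
--         box_nr = (box_nr + ord(ch)) * 17 % 256
--     focal_length = int(command[i + 1:]) if command[i] == "=" else None
--     return box_nr, label, focal_length
-- ===== Notes on version B (the rewrite author's own statement) =====
-- stated objective: simpler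
-- what changed: A fuses separator detection and hashing into one loop with an early return; B first scans only for the index of the first '='/'-', then slices out the label and folds the AoC hash over it in a separate pass, so control flow (locate, split, hash, parse) is a straight-line pipeline instead of a loop carrying the hash state.
import Mathlib
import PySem

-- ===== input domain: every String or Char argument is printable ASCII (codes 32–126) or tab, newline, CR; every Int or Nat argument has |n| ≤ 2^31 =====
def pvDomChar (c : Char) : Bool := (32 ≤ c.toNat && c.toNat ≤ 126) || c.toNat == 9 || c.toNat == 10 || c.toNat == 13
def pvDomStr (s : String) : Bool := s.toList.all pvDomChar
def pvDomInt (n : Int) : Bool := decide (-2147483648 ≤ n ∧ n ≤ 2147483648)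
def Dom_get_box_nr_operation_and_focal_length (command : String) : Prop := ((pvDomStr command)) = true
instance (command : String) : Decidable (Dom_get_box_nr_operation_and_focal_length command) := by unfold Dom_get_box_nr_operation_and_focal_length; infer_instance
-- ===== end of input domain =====

-- B changes the decomposition: it first locates the first '='/'-' with an index scan,
-- then hashes the label in a second, separate pass (objective: simpler; no speed claim).

-- ===== PORT A =====
-- A: one fused loop over enumerate(command): hash as it goes, early return at the
-- first '='/'-'.  'none' = the Python raises (ValueError, incl. int() failing).
def pvA_loop (command : List Char) (pairs : List (Int × Char)) (box_nr : Int) :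
    Option (Int × Option String × Option Int) :=
  match pairs with
  | [] => none
  | (i, c) :: rest =>
    if c == '=' || c == '-' then
      let label := PySem.List.slice command none (some i)
      if c == '=' then
        match PySem.Int.ofChars? (PySem.List.slice command (some (i + 1)) none) with
        | none => none
        | some fl => some (box_nr, some (String.ofList label), some fl)
      else
        some (box_nr, some (String.ofList label), none)
    else
      pvA_loop command rest (PySem.Int.mod ((box_nr + (c.toNat : Int)) * 17) 256)

def get_box_nr_operation_and_focal_length (command : String) :
    Int × Option String × Option Int :=
  (pvA_loop command.toList (PySem.List.enumerate command.toList 0) 0).getD (0, none, none)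

-- ===== PORT B =====
-- while i < n and command[i] not in "=-": i += 1
def pvScanSep (cs : List Char) (i : Nat) : Nat :=
  match cs with
  | [] => i
  | c :: cs' => if c == '=' || c == '-' then i else pvScanSep cs' (i + 1)

-- for ch in label: box_nr = (box_nr + ord(ch)) * 17 % 256
def pvHashLabel (label : List Char) : Int :=
  label.foldl (fun b c => PySem.Int.mod ((b + (c.toNat : Int)) * 17) 256) 0

def get_box_nr_operation_and_focal_length_alt (command : String) :
    Int × Option String × Option Int :=
  let cs := command.toList
  let n := cs.length
  let i := pvScanSep cs 0
  if i == n then (0, none, none)  -- raise ValueError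
  else
    let label := PySem.List.slice cs none (some (i : Int))
    let box_nr := pvHashLabel label
    match PySem.List.pyGet? cs (i : Int) with
    | none => (0, none, none)  -- unreachable: i < n
    | some op =>
      if op == '=' then
        match PySem.Int.ofChars? (PySem.List.slice cs (some ((i : Int) + 1)) none) with
        | none => (0, none, none)  -- int(...) raises ValueError
        | some fl => (box_nr, some (String.ofList label), some fl)
      else
        (box_nr, some (String.ofList label), none)

-- ===== PRECONDITION & SPEC =====
-- Pre_ excludes exactly the inputs where Python A raises: commands with no '='/'-'
-- (ValueError), and commands whose first operation char is '=' but whose remainder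
-- is not a valid int literal (int() raises ValueError).
def Pre_get_box_nr_operation_and_focal_length (command : String) : Prop :=
  let rest := command.toList.dropWhile (fun c => !(c == '=' || c == '-'))
  rest ≠ [] ∧ (rest.head? = some '=' → (PySem.Int.ofChars? rest.tail).isSome)
instance (command : String) : Decidable (Pre_get_box_nr_operation_and_focal_length command) := by
  unfold Pre_get_box_nr_operation_and_focal_length; infer_instance

def pvWitness_get_box_nr_operation_and_focal_length : String := "ab=7"

def Spec_get_box_nr_operation_and_focal_length (command : String)
    (out : Int × Option String × Option Int) : Prop :=
  out = get_box_nr_operation_and_focal_length_alt command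
instance (command : String) (out : Int × Option String × Option Int) :
    Decidable (Spec_get_box_nr_operation_and_focal_length command out) := by
  unfold Spec_get_box_nr_operation_and_focal_length; infer_instance

-- ===== CLAIM (what is proved, stated in full; the proofs are below) =====
def Claim_equal_get_box_nr_operation_and_focal_length : Prop :=
  ∀ (command : String), Dom_get_box_nr_operation_and_focal_length command →
    Pre_get_box_nr_operation_and_focal_length command →
    Spec_get_box_nr_operation_and_focal_length command
      (get_box_nr_operation_and_focal_length command)

-- ===== LEMMAS AND PROOFS =====

-- 'c is not a stopping operation', named so simp does not rewrite it apart
def pvNotSep (c : Char) : Bool := !(c == '=' || c == '-')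

theorem pvNotSep_false {c : Char} (h : pvNotSep c = false) :
    (c == '=' || c == '-') = true := by
  unfold pvNotSep at h
  cases hx : (c == '=' || c == '-') with
  | true => rfl
  | false => rw [hx] at h; simp at h

theorem pvNotSep_true {c : Char} (h : pvNotSep c = true) :
    (c == '=' || c == '-') = false := by
  unfold pvNotSep at h
  cases hx : (c == '=' || c == '-') with
  | true => rw [hx] at h; simp at h
  | false => rfl

theorem pvHashLabel_append_singleton (pre : List Char) (c : Char) :
    pvHashLabel (pre ++ [c]) =
      PySem.Int.mod ((pvHashLabel pre + (c.toNat : Int)) * 17) 256 := by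
  simp [pvHashLabel]

-- A's fused loop, characterised by the takeWhile/dropWhile split of the input.
theorem pvA_loop_spec (rest pre : List Char)
    (hpre : ∀ c ∈ pre, pvNotSep c = true) :
    pvA_loop (pre ++ rest) (PySem.List.enumerate rest (pre.length : Int))
        (pvHashLabel pre) =
      match rest.dropWhile pvNotSep with
      | [] => none
      | c :: cs' =>
        let label := pre ++ rest.takeWhile pvNotSep
        if c == '=' then
          (PySem.Int.ofChars? cs').map
            (fun fl => (pvHashLabel label, some (String.ofList label), some fl))
        else
          some (pvHashLabel label, some (String.ofList label), none)
    := by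
  induction rest generalizing pre with
  | nil => simp [PySem.List.enumerate_nil, pvA_loop]
  | cons c cs' ih =>
    rw [PySem.List.enumerate_cons]
    cases hs : pvNotSep c with
    | false =>
      have hc := pvNotSep_false hs
      have hdrop : (c :: cs').dropWhile pvNotSep = c :: cs' := by
        rw [List.dropWhile_cons, if_neg (by simp [hs])]
      have htake : (c :: cs').takeWhile pvNotSep = [] := by
        rw [List.takeWhile_cons, if_neg (by simp [hs])]
      have hslice1 : PySem.List.slice (pre ++ c :: cs') none (some (pre.length : Int)) = pre := by
        rw [PySem.List.slice_to_natCast]; simp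
      have hslice2 :
          PySem.List.slice (pre ++ c :: cs') (some ((pre.length : Int) + 1)) none = cs' := by
        have h1 : (pre.length : Int) + 1 = ((pre.length + 1 : Nat) : Int) := by push_cast; ring
        rw [h1, PySem.List.slice_from_natCast]
        rw [show pre ++ c :: cs' = (pre ++ [c]) ++ cs' by simp]
        rw [show pre.length + 1 = (pre ++ [c]).length + 0 by simp]
        rw [List.drop_append]
        simp
      rw [hdrop]
      simp only [pvA_loop, hc, if_true, hslice1, hslice2, htake, List.append_nil]
      cases he : c == '=' with
      | true => cases PySem.Int.ofChars? cs' <;> rfl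
      | false => rfl
    | true =>
      have hc' := pvNotSep_true hs
      have hstep : pvA_loop (pre ++ c :: cs')
            ((((pre.length : Int), c)) :: PySem.List.enumerate cs' ((pre.length : Int) + 1))
            (pvHashLabel pre)
          = pvA_loop (pre ++ c :: cs') (PySem.List.enumerate cs' ((pre.length : Int) + 1))
              (PySem.Int.mod ((pvHashLabel pre + (c.toNat : Int)) * 17) 256) := by
        simp only [pvA_loop, hc', Bool.false_eq_true, if_false]
      have hlen : ((pre ++ [c]).length : Int) = (pre.length : Int) + 1 := by
        simp
      have hrec := ih (pre ++ [c]) (by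
        intro x hx
        rcases List.mem_append.mp hx with h | h
        · exact hpre x h
        · simp at h; subst h; exact hs)
      rw [hstep, ← pvHashLabel_append_singleton, ← hlen]
      simp only [List.append_assoc, List.singleton_append] at hrec
      rw [hrec]
      have hdrop : (c :: cs').dropWhile pvNotSep = cs'.dropWhile pvNotSep := by
        rw [List.dropWhile_cons, if_pos hs]
      have htake : (c :: cs').takeWhile pvNotSep = c :: cs'.takeWhile pvNotSep := by
        rw [List.takeWhile_cons, if_pos hs]
      rw [hdrop, htake]

theorem pvScanSep_spec (cs : List Char) (i : Nat) :
    pvScanSep cs i = i + (cs.takeWhile pvNotSep).length := by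
  induction cs generalizing i with
  | nil => simp [pvScanSep]
  | cons c cs' ih =>
    cases hs : pvNotSep c with
    | false =>
      have hc := pvNotSep_false hs
      rw [show pvScanSep (c :: cs') i = if c == '=' || c == '-' then i else pvScanSep cs' (i + 1)
          from rfl, if_pos hc, List.takeWhile_cons, if_neg (by simp [hs])]
      simp
    | true =>
      have hc' := pvNotSep_true hs
      rw [show pvScanSep (c :: cs') i = if c == '=' || c == '-' then i else pvScanSep cs' (i + 1)
          from rfl, if_neg (by simp [hc']), List.takeWhile_cons, if_pos hs, ih]
      simp; omega

-- both ports compute the same function on EVERY input (raising inputs map to the default)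
theorem ports_agree (command : String) :
    get_box_nr_operation_and_focal_length command =
      get_box_nr_operation_and_focal_length_alt command := by
  unfold get_box_nr_operation_and_focal_length get_box_nr_operation_and_focal_length_alt
  dsimp only
  generalize command.toList = cs
  have hA := pvA_loop_spec cs [] (by intro c h; simp at h)
  rw [show pvHashLabel [] = (0 : Int) from rfl] at hA
  simp only [List.nil_append, List.length_nil, Nat.cast_zero] at hA
  rw [hA, pvScanSep_spec cs 0, Nat.zero_add]
  have hsplit : cs.takeWhile pvNotSep ++ cs.dropWhile pvNotSep = cs :=
    List.takeWhile_append_dropWhile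
  generalize cs.takeWhile pvNotSep = t at hsplit ⊢
  generalize cs.dropWhile pvNotSep = d at hsplit ⊢
  subst hsplit
  cases d with
  | nil =>
    rw [if_pos (by simp)]
    rfl
  | cons c cs' =>
    rw [if_neg (by simp)]
    have hget : PySem.List.pyGet? (t ++ c :: cs') (t.length : Int) = some c := by
      rw [PySem.List.pyGet?_natCast, List.getElem?_append_right (Nat.le_refl _)]
      simp
    have hslice1 : PySem.List.slice (t ++ c :: cs') none (some (t.length : Int)) = t := by
      rw [PySem.List.slice_to_natCast, List.take_left]
    have hslice2 : PySem.List.slice (t ++ c :: cs') (some ((t.length : Int) + 1)) none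
        = cs' := by
      have h1 : (t.length : Int) + 1 = ((t.length + 1 : Nat) : Int) := by push_cast; ring
      rw [h1, PySem.List.slice_from_natCast]
      rw [show t ++ c :: cs' = (t ++ [c]) ++ cs' by simp]
      rw [show t.length + 1 = (t ++ [c]).length by simp]
      rw [List.drop_left]
    rw [hget, hslice1, hslice2]
    cases he : c == '=' with
    | true =>
      simp only [he, if_true]
      cases PySem.Int.ofChars? cs' <;> rfl
    | false =>
      simp only [he, Bool.false_eq_true, if_false]
      rfl

-- ===== VERDICT (by name: the statement is the Claim_ definition above) =====
theorem get_box_nr_operation_and_focal_length_spec :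
    Claim_equal_get_box_nr_operation_and_focal_length := by
  intro command _ _
  unfold Spec_get_box_nr_operation_and_focal_length
  exact ports_agree command
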